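-- pv_equiv track=rewrite | github.com/mlhamel/adventofcode2018 | adventofcode2018/day2.py | make_checksum
-- ===== SOURCE A (Python) =====
-- from itertools import combinations
-- from typing import List
--
-- def make_checksum(values: List[str]) -> int:
--     def has_pairs(value: str) -> bool:
--         pairs = {x for x in combinations(value, 2)}
--
--         number_full_pairs = len([pair for pair in pairs
--                                  if all(p == pair[0] for p in pair)])
--         return number_full_pairs != 0
--
--     def has_thirds(value: str) -> bool:
--         thirds = {x for x in combinations(value, 3)}
--
--         number_full_thirds = len([third for third in thirds
--                                   if all(p == third[0] for p in third)])
--         return number_full_thirds != 0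
--
--     number_of_pairs = len([value for value in values if has_pairs(value)])
--     number_of_thirds = len([value for value in values if has_thirds(value)])
--
--     return number_of_pairs * number_of_thirds
-- ===== SOURCE B (Python) =====
-- def make_checksum(values):
--     twos = 0
--     threes = 0
--     for value in values:
--         counts = {}
--         for ch in value:
--             counts[ch] = counts.get(ch, 0) + 1
--         if any(c >= 2 for c in counts.values()):
--             twos += 1
--         if any(c >= 3 for c in counts.values()):
--             threes += 1
--     return twos * threes
-- ===== Notes on version B (the rewrite author's own statement) =====
-- stated objective: faster
-- what changed: Replaces per-string enumeration of all 2- and 3-combinations (deduped through a set) with a single character-count dictionary per string, checked for a count >= 2 and >= 3 in one pass over the list.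
import Mathlib
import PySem

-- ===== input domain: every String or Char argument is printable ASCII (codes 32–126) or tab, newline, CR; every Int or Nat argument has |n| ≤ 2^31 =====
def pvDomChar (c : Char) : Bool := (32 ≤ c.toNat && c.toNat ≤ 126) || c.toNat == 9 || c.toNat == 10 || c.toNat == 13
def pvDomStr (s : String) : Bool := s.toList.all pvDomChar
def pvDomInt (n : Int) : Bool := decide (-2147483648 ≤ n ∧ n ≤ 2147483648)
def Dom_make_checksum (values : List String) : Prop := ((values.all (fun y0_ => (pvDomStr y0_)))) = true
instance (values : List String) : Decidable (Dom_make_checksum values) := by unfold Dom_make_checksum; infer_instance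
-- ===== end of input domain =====

-- B replaces A's per-string enumeration of all 2-/3-combinations (deduped via a set) with a
-- character-count dictionary per string checked for a count >= 2 / >= 3 in one pass.


-- ===== PORT A =====
-- combinations(value, 2): all ordered-by-position pairs (value[i], value[j]), i < j
def pvComb2 : List Char → List (Char × Char)
  | [] => []
  | c :: rest => rest.map (fun x => (c, x)) ++ pvComb2 rest

-- combinations(value, 3)
def pvComb3 : List Char → List (Char × Char × Char)
  | [] => []
  | c :: rest => (pvComb2 rest).map (fun p => (c, p.1, p.2)) ++ pvComb3 rest

def pvHasPairs (value : String) : Bool :=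
  let pairs := PySem.Set.ofList (pvComb2 value.toList)
  let number_full_pairs := (pairs.filter (fun p => p.1 == p.1 && p.2 == p.1)).length
  number_full_pairs != 0

def pvHasThirds (value : String) : Bool :=
  let thirds := PySem.Set.ofList (pvComb3 value.toList)
  let number_full_thirds := (thirds.filter (fun t => t.1 == t.1 && t.2.1 == t.1 && t.2.2 == t.1)).length
  number_full_thirds != 0

def make_checksum (values : List String) : Int :=
  let number_of_pairs := (values.filter (fun v => pvHasPairs v)).length
  let number_of_thirds := (values.filter (fun v => pvHasThirds v)).length
  (number_of_pairs : Int) * (number_of_thirds : Int)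

-- ===== PORT B =====
def pvCounts (value : String) : PySem.Dict Char Int :=
  value.toList.foldl (fun d ch => d.insert ch (d.getD ch 0 + 1)) PySem.Dict.empty

def make_checksum_alt (values : List String) : Int :=
  let r := values.foldl
    (fun (acc : Int × Int) value =>
      let counts := pvCounts value
      let t2 := if counts.values.any (fun c => 2 ≤ c) then acc.1 + 1 else acc.1
      let t3 := if counts.values.any (fun c => 3 ≤ c) then acc.2 + 1 else acc.2
      (t2, t3))
    (0, 0)
  r.1 * r.2

-- ===== PRECONDITION & SPEC =====
def Spec_make_checksum (values : List String) (out : Int) : Prop := out = make_checksum_alt values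
instance (values : List String) (out : Int) : Decidable (Spec_make_checksum values out) := by unfold Spec_make_checksum; infer_instance

-- ===== CLAIM (what is proved, stated in full; the proofs are below) =====
def Claim_equal_make_checksum : Prop := ∀ (values : List String), Dom_make_checksum values → Spec_make_checksum values (make_checksum values)

-- ===== LEMMAS AND PROOFS =====

lemma mem_comb2 (l : List Char) (a : Char) : (a, a) ∈ pvComb2 l ↔ 2 ≤ l.count a := by
  induction l with
  | nil => simp [pvComb2]
  | cons c rest ih =>
    simp only [pvComb2, List.mem_append, List.mem_map, List.count_cons, Prod.mk.injEq,
      beq_iff_eq]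
    have hpos := List.count_pos_iff (a := a) (l := rest)
    by_cases h : c = a
    · subst h
      simp only [if_true, true_and]
      constructor
      · rintro (⟨x, hx, h2⟩ | hm)
        · subst h2; have := hpos.mpr hx; omega
        · have := ih.mp hm; omega
      · intro hc
        rcases Nat.lt_or_ge (rest.count c) 2 with h2 | h2
        · exact Or.inl ⟨c, hpos.mp (by omega), rfl⟩
        · exact Or.inr (ih.mpr h2)
    · simp only [if_neg h, Nat.add_zero]
      constructor
      · rintro (⟨x, _, h1, _⟩ | hm)
        · exact absurd h1 h
        · exact ih.mp hm
      · intro hc; exact Or.inr (ih.mpr hc)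


lemma mem_comb3 (l : List Char) (a : Char) : (a, a, a) ∈ pvComb3 l ↔ 3 ≤ l.count a := by
  induction l with
  | nil => simp [pvComb3]
  | cons c rest ih =>
    simp only [pvComb3, List.mem_append, List.mem_map, List.count_cons, Prod.mk.injEq,
      beq_iff_eq]
    have hpos := mem_comb2 rest a
    by_cases h : c = a
    · subst h
      simp only [if_true, true_and]
      constructor
      · rintro (⟨p, hp, h1, h2⟩ | hm)
        · obtain ⟨p1, p2⟩ := p
          simp only at h1 h2
          subst h1; subst h2
          have := hpos.mp hp; omega
        · have := ih.mp hm; omega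
      · intro hc
        rcases Nat.lt_or_ge (rest.count c) 3 with h2 | h2
        · exact Or.inl ⟨(c, c), hpos.mpr (by omega), rfl, rfl⟩
        · exact Or.inr (ih.mpr h2)
    · simp only [if_neg h, Nat.add_zero]
      constructor
      · rintro (⟨p, _, h1, _⟩ | hm)
        · exact absurd h1 h
        · exact ih.mp hm
      · intro hc; exact Or.inr (ih.mpr hc)

lemma hasPairs_iff (v : String) : pvHasPairs v = true ↔ ∃ a, 2 ≤ v.toList.count a := by
  simp only [pvHasPairs, bne_iff_ne, ne_eq, List.length_eq_zero_iff]
  rw [List.filter_eq_nil_iff]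
  push Not
  constructor
  · rintro ⟨⟨x, y⟩, hm, hy⟩
    rw [PySem.Set.mem_ofList] at hm
    simp only [Bool.and_eq_true, beq_iff_eq, true_and] at hy
    subst hy
    exact ⟨_, (mem_comb2 _ _).mp hm⟩
  · rintro ⟨a, ha⟩
    exact ⟨(a, a), (PySem.Set.mem_ofList _ _).mpr ((mem_comb2 _ _).mpr ha), by simp⟩

lemma hasThirds_iff (v : String) : pvHasThirds v = true ↔ ∃ a, 3 ≤ v.toList.count a := by
  simp only [pvHasThirds, bne_iff_ne, ne_eq, List.length_eq_zero_iff]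
  rw [List.filter_eq_nil_iff]
  push Not
  constructor
  · rintro ⟨⟨x, y, z⟩, hm, hy⟩
    rw [PySem.Set.mem_ofList] at hm
    simp only [Bool.and_eq_true, beq_iff_eq, true_and] at hy
    obtain ⟨h1, h2⟩ := hy
    subst h1; subst h2
    exact ⟨_, (mem_comb3 _ _).mp hm⟩
  · rintro ⟨a, ha⟩
    exact ⟨(a, a, a), (PySem.Set.mem_ofList _ _).mpr ((mem_comb3 _ _).mpr ha), by simp⟩

lemma counts_any_iff (v : String) (k : Int) (hk : 1 ≤ k) :
    ((pvCounts v).values.any (fun c => k ≤ c)) = true ↔ ∃ a, k ≤ (v.toList.count a : Int) := by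
  have hc : pvCounts v = PySem.Dict.counter v.toList :=
    PySem.Dict.foldl_insert_getD_add_one_eq_counter v.toList
  rw [hc]
  simp only [PySem.Dict.values, PySem.Dict.items_counter, List.map_map, List.any_eq_true,
    List.mem_map, Function.comp]
  constructor
  · rintro ⟨c, ⟨a, _, rfl⟩, hk2⟩
    exact ⟨a, by simpa using hk2⟩
  · rintro ⟨a, ha⟩
    have hmem : a ∈ v.toList := by
      have h0 : (0 : Int) < (v.toList.count a : Int) := by linarith
      exact List.count_pos_iff.mp (by exact_mod_cast h0)
    exact ⟨(v.toList.count a : Int), ⟨a, (PySem.Set.mem_ofList _ _).mpr hmem, rfl⟩,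
      by simpa using ha⟩

lemma pairs_pred_eq (v : String) :
    pvHasPairs v = ((pvCounts v).values.any (fun c => 2 ≤ c)) := by
  rw [Bool.eq_iff_iff, hasPairs_iff, counts_any_iff v 2 (by norm_num)]
  exact ⟨fun ⟨a, h⟩ => ⟨a, by exact_mod_cast h⟩, fun ⟨a, h⟩ => ⟨a, by exact_mod_cast h⟩⟩

lemma thirds_pred_eq (v : String) :
    pvHasThirds v = ((pvCounts v).values.any (fun c => 3 ≤ c)) := by
  rw [Bool.eq_iff_iff, hasThirds_iff, counts_any_iff v 3 (by norm_num)]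
  exact ⟨fun ⟨a, h⟩ => ⟨a, by exact_mod_cast h⟩, fun ⟨a, h⟩ => ⟨a, by exact_mod_cast h⟩⟩

lemma foldl_pair (p q : String → Bool) (values : List String) (a b : Int) :
    values.foldl
      (fun (acc : Int × Int) value =>
        ((if p value then acc.1 + 1 else acc.1), (if q value then acc.2 + 1 else acc.2)))
      (a, b)
    = (a + (values.countP p : Int), b + (values.countP q : Int)) := by
  induction values generalizing a b with
  | nil => simp
  | cons v rest ih =>
    simp only [List.foldl_cons, List.countP_cons, ih]
    simp only [Prod.mk.injEq]
    constructor <;> (split_ifs <;> push_cast <;> ring)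

lemma pvMain (values : List String) : make_checksum values = make_checksum_alt values := by
  have halt : make_checksum_alt values
      = ((values.countP (fun v => (pvCounts v).values.any (fun c => 2 ≤ c)) : Int))
        * ((values.countP (fun v => (pvCounts v).values.any (fun c => 3 ≤ c)) : Int)) := by
    show (values.foldl _ ((0 : Int), (0 : Int))).1 * (values.foldl _ ((0 : Int), (0 : Int))).2 = _
    rw [foldl_pair (fun v => (pvCounts v).values.any (fun c => 2 ≤ c))
      (fun v => (pvCounts v).values.any (fun c => 3 ≤ c)) values 0 0]
    simp
  rw [halt, make_checksum]
  simp only [← List.countP_eq_length_filter]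
  simp only [pairs_pred_eq, thirds_pred_eq]


-- ===== VERDICT (by name: the statement is the Claim_ definition above) =====
theorem make_checksum_spec : Claim_equal_make_checksum := by
  intro values _
  unfold Spec_make_checksum
  exact pvMain values
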